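-- pv_equiv track=rewrite | github.com/pyr0ken/uni | mabani/03.py | draw_branch
-- ===== SOURCE A (Python) =====
-- def draw_branch(branch_length, branch_height, branch_width, trunk_center):
--     """Generates a list of strings for the tree branches ('*')."""
--
--     lines = []
--     for level in range(branch_height):
--         # Calculate how far the branch spreads at this level
--         spread = (level + 1) * branch_length // branch_height
--         width_at_level = min(spread * 2 + 1, branch_width)
--
--         start = trunk_center - spread
--         end = trunk_center + spread + 1
--
--         # Create the line with a buffer
--         line = [' '] * (trunk_center * 2 + branch_length + 10)
--         for i in range(max(0, start), min(len(line), end)):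
--             if width_at_level > 0:
--                 line[i] = '*'
--
--         lines.append(''.join(line).rstrip())
--
--     return lines
-- ===== SOURCE B (Python) =====
-- def draw_branch(branch_length, branch_height, branch_width, trunk_center):
--     """Generates a list of strings for the tree branches ('*')."""
--     buf_len = max(0, trunk_center * 2 + branch_length + 10)
--     lines = []
--     for level in range(branch_height):
--         spread = (level + 1) * branch_length // branch_height
--         width_at_level = min(spread * 2 + 1, branch_width)
--         lo = max(0, trunk_center - spread)
--         hi = min(buf_len, trunk_center + spread + 1)
--         if width_at_level > 0 and lo < hi:
--             lines.append(' ' * lo + '*' * (hi - lo))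
--         else:
--             lines.append('')
--     return lines
-- ===== Notes on version B (the rewrite author's own statement) =====
-- stated objective: faster
-- what changed: Each level's line is computed as a closed-form string ' '*lo + '*'*count instead of allocating a full space buffer, filling it index by index in an inner loop, joining and rstrip-ing; the buffer, inner fill loop, join and rstrip all disappear.
import Mathlib
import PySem

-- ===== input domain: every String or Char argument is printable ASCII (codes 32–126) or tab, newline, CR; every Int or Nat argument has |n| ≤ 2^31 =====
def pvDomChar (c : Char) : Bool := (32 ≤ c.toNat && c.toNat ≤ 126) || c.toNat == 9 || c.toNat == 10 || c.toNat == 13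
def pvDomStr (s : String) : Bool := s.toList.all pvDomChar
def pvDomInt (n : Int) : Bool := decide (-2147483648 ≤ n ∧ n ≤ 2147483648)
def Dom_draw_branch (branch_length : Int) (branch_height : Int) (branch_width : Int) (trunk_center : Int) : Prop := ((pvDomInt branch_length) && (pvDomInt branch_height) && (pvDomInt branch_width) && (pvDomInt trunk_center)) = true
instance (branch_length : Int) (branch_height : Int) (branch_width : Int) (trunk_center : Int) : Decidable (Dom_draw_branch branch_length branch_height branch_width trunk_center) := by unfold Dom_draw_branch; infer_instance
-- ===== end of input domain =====

-- B replaces A's per-level space-buffer + fill loop + join + rstrip by one closed-form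
-- string ' '*lo + '*'*(hi-lo) per level (simpler; same outer loop formulas).

-- ===== PORT A =====
-- ''.join of a list of single-character strings followed by .rstrip() is ported as
-- String.ofList ∘ PySem.Chars.rstrip on the List Char buffer (exact).
def draw_branch (branch_length : Int) (branch_height : Int) (branch_width : Int) (trunk_center : Int) : List String :=
  (PySem.List.pyRange 0 branch_height 1).foldl (fun lines level =>
    let spread := PySem.Int.floordiv ((level + 1) * branch_length) branch_height
    let width_at_level := min (spread * 2 + 1) branch_width
    let start := trunk_center - spread
    let end_ := trunk_center + spread + 1
    let line : List Char := PySem.List.pyRepeat [' '] (trunk_center * 2 + branch_length + 10)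
    let line := (PySem.List.pyRange (max 0 start) (min (line.length : Int) end_) 1).foldl
      (fun l i => if width_at_level > 0 then l.set i.toNat '*' else l) line
    lines ++ [String.ofList (PySem.Chars.rstrip line)]) []

-- ===== PORT B =====
def draw_branch_alt (branch_length : Int) (branch_height : Int) (branch_width : Int) (trunk_center : Int) : List String :=
  let buf_len := max 0 (trunk_center * 2 + branch_length + 10)
  (PySem.List.pyRange 0 branch_height 1).foldl (fun lines level =>
    let spread := PySem.Int.floordiv ((level + 1) * branch_length) branch_height
    let width_at_level := min (spread * 2 + 1) branch_width
    let lo := max 0 (trunk_center - spread)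
    let hi := min buf_len (trunk_center + spread + 1)
    lines ++ [if width_at_level > 0 ∧ lo < hi then
        String.ofList (List.replicate lo.toNat ' ' ++ List.replicate (hi - lo).toNat '*')
      else ""]) []

-- ===== PRECONDITION & SPEC =====
def Spec_draw_branch (branch_length : Int) (branch_height : Int) (branch_width : Int) (trunk_center : Int) (out : List String) : Prop := out = draw_branch_alt branch_length branch_height branch_width trunk_center
instance (branch_length : Int) (branch_height : Int) (branch_width : Int) (trunk_center : Int) (out : List String) : Decidable (Spec_draw_branch branch_length branch_height branch_width trunk_center out) := by unfold Spec_draw_branch; infer_instance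

-- ===== CLAIM (what is proved, stated in full; the proofs are below) =====
def Claim_equal_draw_branch : Prop := ∀ (branch_length : Int) (branch_height : Int) (branch_width : Int) (trunk_center : Int), Dom_draw_branch branch_length branch_height branch_width trunk_center → Spec_draw_branch branch_length branch_height branch_width trunk_center (draw_branch branch_length branch_height branch_width trunk_center)

-- ===== LEMMAS AND PROOFS =====

lemma foldl_keep {α β : Type} (l : List α) (c : β) : l.foldl (fun acc _ => acc) c = c := by
  induction l generalizing c with
  | nil => rfl
  | cons x t ih => exact ih c

lemma foldl_set_getElem? (ixs : List Int) (cs : List Char) (j : Nat)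
    (hix : ∀ i ∈ ixs, 0 ≤ i) :
    (ixs.foldl (fun l i => l.set i.toNat '*') cs)[j]? =
      if (j : Int) ∈ ixs ∧ j < cs.length then some '*' else cs[j]? := by
  induction ixs generalizing cs with
  | nil => simp
  | cons i t ih =>
    have hi0 : 0 ≤ i := hix i (by simp)
    rw [List.foldl_cons, ih (cs.set i.toNat '*') (fun x hx => hix x (by simp [hx]))]
    simp only [List.length_set, List.mem_cons, List.getElem?_set]
    by_cases hjt : (j : Int) ∈ t
    · by_cases hjl : j < cs.length
      · simp [hjt, hjl]
      · simp only [hjt, or_true, hjl, and_false, if_neg, not_false_iff]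
        split_ifs with hcase hlen
        · omega
        · exact (List.getElem?_eq_none (by omega)).symm
        · rfl
    · by_cases hij : i = (j : Int)
      · have h : i.toNat = j := by omega
        by_cases hjl : j < cs.length <;> simp [hjt, hij, hjl]
      · have h : ¬ i.toNat = j := by omega
        simp only [hjt, or_false, h, if_neg, not_false_iff]
        rw [if_neg (by simp), if_neg (fun hx => hij hx.1.symm)]

lemma dropWhile_space_append (c : Nat) (l : List Char) :
    List.dropWhile PySem.Chars.isspace (List.replicate c ' ' ++ l) =
      List.dropWhile PySem.Chars.isspace l := by
  induction c with
  | zero => simp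
  | succ k ih =>
    simp [List.replicate_succ, (by decide : PySem.Chars.isspace ' ' = true), ih]

lemma rstrip_spaces (N : Nat) : PySem.Chars.rstrip (List.replicate N ' ') = [] := by
  simp only [PySem.Chars.rstrip, List.reverse_replicate]
  have h := dropWhile_space_append N ([] : List Char)
  simp only [List.append_nil, List.dropWhile_nil] at h
  simp [h]

lemma rstrip_closed (a b c : Nat) (hb : 0 < b) :
    PySem.Chars.rstrip (List.replicate a ' ' ++ List.replicate b '*' ++ List.replicate c ' ')
      = List.replicate a ' ' ++ List.replicate b '*' := by
  obtain ⟨b', rfl⟩ : ∃ b', b = b' + 1 := ⟨b - 1, by omega⟩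
  simp only [PySem.Chars.rstrip, List.reverse_append, List.reverse_replicate, List.append_assoc]
  rw [dropWhile_space_append, List.replicate_succ, List.cons_append, List.dropWhile_cons]
  simp only [(by decide : PySem.Chars.isspace '*' = false), Bool.false_eq_true, if_false,
    List.reverse_cons, List.reverse_append, List.reverse_replicate, List.append_assoc]
  rw [← List.replicate_succ', ← List.replicate_succ]

lemma replicate3_getElem? (a b c : Nat) (j : Nat) :
    (List.replicate a ' ' ++ List.replicate b '*' ++ List.replicate c ' ')[j]? =
      if j < a then some ' ' else if j < a + b then some '*'
      else if j < a + b + c then some ' ' else none := by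
  simp only [List.getElem?_append, List.length_append, List.length_replicate,
    List.getElem?_replicate]
  split_ifs <;> first | rfl | omega

lemma fill_eq (lo hi : Int) (N : Nat) (hlo : 0 ≤ lo) (hlohi : lo < hi) (hhi : hi ≤ (N : Int)) :
    (PySem.List.pyRange lo hi 1).foldl (fun l i => l.set i.toNat '*') (List.replicate N ' ')
      = List.replicate lo.toNat ' ' ++ List.replicate (hi - lo).toNat '*'
          ++ List.replicate (N - hi.toNat) ' ' := by
  apply List.ext_getElem?
  intro j
  rw [foldl_set_getElem? _ _ _ (fun i hi => by
    have := (PySem.List.mem_pyRange_one).1 hi; omega)]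
  rw [replicate3_getElem?]
  simp only [PySem.List.mem_pyRange_one, List.length_replicate, List.getElem?_replicate]
  split_ifs <;> first | rfl | omega

lemma fill_rstrip (w lo hi : Int) (N : Nat) (hlo : 0 ≤ lo) (hhi : hi ≤ (N : Int)) :
    PySem.Chars.rstrip ((PySem.List.pyRange lo hi 1).foldl
        (fun l i => if w > 0 then l.set i.toNat '*' else l) (List.replicate N ' '))
      = if w > 0 ∧ lo < hi then
          List.replicate lo.toNat ' ' ++ List.replicate (hi - lo).toNat '*'
        else [] := by
  by_cases hw : w > 0
  · simp only [hw, if_pos, true_and]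
    by_cases hlh : lo < hi
    · rw [if_pos hlh, fill_eq lo hi N hlo hlh hhi, rstrip_closed _ _ _ (by omega)]
    · rw [if_neg hlh, PySem.List.pyRange_one_eq_nil (by omega), List.foldl_nil, rstrip_spaces]
  · simp only [hw, false_and, if_neg, not_false_iff]
    rw [foldl_keep, rstrip_spaces]

lemma level_eq (branch_length branch_height branch_width trunk_center level : Int) :
    (let spread := PySem.Int.floordiv ((level + 1) * branch_length) branch_height
     let width_at_level := min (spread * 2 + 1) branch_width
     let start := trunk_center - spread
     let end_ := trunk_center + spread + 1
     let line : List Char := PySem.List.pyRepeat [' '] (trunk_center * 2 + branch_length + 10)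
     let line := (PySem.List.pyRange (max 0 start) (min (line.length : Int) end_) 1).foldl
       (fun l i => if width_at_level > 0 then l.set i.toNat '*' else l) line
     String.ofList (PySem.Chars.rstrip line))
    = (let buf_len := max 0 (trunk_center * 2 + branch_length + 10)
       let spread := PySem.Int.floordiv ((level + 1) * branch_length) branch_height
       let width_at_level := min (spread * 2 + 1) branch_width
       let lo := max 0 (trunk_center - spread)
       let hi := min buf_len (trunk_center + spread + 1)
       if width_at_level > 0 ∧ lo < hi then
         String.ofList (List.replicate lo.toNat ' ' ++ List.replicate (hi - lo).toNat '*')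
       else "") := by
  simp only [PySem.List.pyRepeat_singleton, List.length_replicate]
  set n := trunk_center * 2 + branch_length + 10 with hn
  have hcast : ((n.toNat : Nat) : Int) = max 0 n := by omega
  set s := PySem.Int.floordiv ((level + 1) * branch_length) branch_height with hs
  set w := min (s * 2 + 1) branch_width with hw
  rw [fill_rstrip w (max 0 (trunk_center - s)) (min ((n.toNat : Nat) : Int) (trunk_center + s + 1))
    n.toNat (by omega) (by omega)]
  rw [hcast]
  by_cases hc : w > 0 ∧ max 0 (trunk_center - s) < min (max 0 n) (trunk_center + s + 1)
  · rw [if_pos hc, if_pos hc]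
  · rw [if_neg hc, if_neg hc]

-- ===== VERDICT (by name: the statement is the Claim_ definition above) =====
theorem draw_branch_spec : Claim_equal_draw_branch := by
  intro branch_length branch_height branch_width trunk_center _
  show draw_branch branch_length branch_height branch_width trunk_center
      = draw_branch_alt branch_length branch_height branch_width trunk_center
  rw [show draw_branch branch_length branch_height branch_width trunk_center
      = (PySem.List.pyRange 0 branch_height 1).foldl (fun lines level => lines ++ [(fun level =>
          let spread := PySem.Int.floordiv ((level + 1) * branch_length) branch_height
          let width_at_level := min (spread * 2 + 1) branch_width
          let start := trunk_center - spread
          let end_ := trunk_center + spread + 1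
          let line : List Char := PySem.List.pyRepeat [' '] (trunk_center * 2 + branch_length + 10)
          let line := (PySem.List.pyRange (max 0 start) (min (line.length : Int) end_) 1).foldl
            (fun l i => if width_at_level > 0 then l.set i.toNat '*' else l) line
          String.ofList (PySem.Chars.rstrip line)) level]) [] from rfl]
  rw [show draw_branch_alt branch_length branch_height branch_width trunk_center
      = (PySem.List.pyRange 0 branch_height 1).foldl (fun lines level => lines ++ [(fun level =>
          let buf_len := max 0 (trunk_center * 2 + branch_length + 10)
          let spread := PySem.Int.floordiv ((level + 1) * branch_length) branch_height
          let width_at_level := min (spread * 2 + 1) branch_width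
          let lo := max 0 (trunk_center - spread)
          let hi := min buf_len (trunk_center + spread + 1)
          if width_at_level > 0 ∧ lo < hi then
            String.ofList (List.replicate lo.toNat ' ' ++ List.replicate (hi - lo).toNat '*')
          else "") level]) [] from rfl]
  rw [PySem.List.foldl_append_singleton_eq_map, PySem.List.foldl_append_singleton_eq_map]
  exact congrArg _ (List.map_congr_left (fun level _ =>
    level_eq branch_length branch_height branch_width trunk_center level))
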